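-- pv_equiv track=rewrite | github.com/Kkokkomu/algorithm | seungwon/week2/체육복.py | solution
-- ===== SOURCE A (Python) =====
-- def solution(n, lost, reserve):
--     lost_set = set(lost)
--     reserve_set = set(reserve)
--     # 여벌 체육복을 가져왔으면서 도난당한 학생의 집합
--     intersect = lost_set & reserve_set
--
--     # 여벌 체육복을 가져온 학생이 도난당한 경우에는 여벌 체육복을 본인이 사용
--     lost_set -= intersect
--     reserve_set -= intersect
--
--     # 여벌 체육복이 있는 경우 무조건 본인의 앞번호 학생에게 먼저 빌려줌을 시도하고
--     # 그 후에 뒤에 학생에게 빌려줌을 시도함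
--     for e in sorted(reserve_set):
--         if e - 1 in lost_set:
--             lost_set.remove(e - 1)
--         elif e + 1 in lost_set:
--             lost_set.remove(e + 1)
--
--     return n - len(lost_set)
-- ===== SOURCE B (Python) =====
-- def solution(n, lost, reserve):
--     # two-pointer merge over the two sorted disjoint lists instead of
--     # repeated set-membership tests and removals
--     ls = sorted(set(lost) - set(reserve))
--     rs = sorted(set(reserve) - set(lost))
--     i = j = matched = 0
--     while i < len(ls) and j < len(rs):
--         if ls[i] < rs[j] - 1:
--             i += 1
--         elif ls[i] <= rs[j] + 1:   # ls[i] == rs[j]-1 or rs[j]+1 (equality impossible)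
--             matched += 1
--             i += 1
--             j += 1
--         else:
--             j += 1
--     return n - (len(ls) - matched)
-- ===== Notes on version B (the rewrite author's own statement) =====
-- stated objective: alternative
-- what changed: Replaces A's per-reserve set membership tests and removals on a mutable set with a single two-pointer merge scan over the two sorted, deduplicated, disjoint lists, counting matches instead of mutating a set.
import Mathlib
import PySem

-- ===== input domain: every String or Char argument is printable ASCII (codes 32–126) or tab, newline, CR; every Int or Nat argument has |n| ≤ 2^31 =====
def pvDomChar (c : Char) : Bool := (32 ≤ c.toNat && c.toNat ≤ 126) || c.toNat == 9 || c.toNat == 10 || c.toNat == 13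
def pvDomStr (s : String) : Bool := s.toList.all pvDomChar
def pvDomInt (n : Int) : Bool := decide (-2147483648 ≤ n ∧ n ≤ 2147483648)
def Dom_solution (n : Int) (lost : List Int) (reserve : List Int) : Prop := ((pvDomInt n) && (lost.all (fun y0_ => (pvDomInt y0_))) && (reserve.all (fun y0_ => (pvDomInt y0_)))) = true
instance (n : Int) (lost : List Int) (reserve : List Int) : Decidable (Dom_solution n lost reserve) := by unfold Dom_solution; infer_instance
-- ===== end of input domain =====

-- B replaces A's per-reserve set lookups/removals by a single two-pointer merge of the
-- two sorted disjoint lists (alternative decomposition; same asymptotic cost).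

-- ===== PORT A =====
-- the body of A's for-loop: try to lend to e-1, else to e+1
def lendStep (ls : PySem.Set Int) (e : Int) : PySem.Set Int :=
  if PySem.Set.contains ls (e - 1) then (PySem.Set.remove? ls (e - 1)).getD ls
  else if PySem.Set.contains ls (e + 1) then (PySem.Set.remove? ls (e + 1)).getD ls
  else ls

def solution (n : Int) (lost : List Int) (reserve : List Int) : Int :=
  let lost_set : PySem.Set Int := PySem.Set.ofList lost
  let reserve_set : PySem.Set Int := PySem.Set.ofList reserve
  let intersect := PySem.Set.inter lost_set reserve_set
  let lost_set2 := PySem.Set.diff lost_set intersect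
  let reserve_set2 := PySem.Set.diff reserve_set intersect
  let finalLost := (PySem.List.sorted reserve_set2 (fun x => x) false).foldl lendStep lost_set2
  n - (finalLost.length : Int)

-- ===== PORT B =====
-- the while-loop of Source B: i/j advance over the two sorted lists, counting matches
def twoPtr : List Int → List Int → Int
  | [], _ => 0
  | _ :: _, [] => 0
  | l :: ls, r :: rs =>
      if l < r - 1 then twoPtr ls (r :: rs)
      else if l ≤ r + 1 then 1 + twoPtr ls rs
      else twoPtr (l :: ls) rs
termination_by ls rs => ls.length + rs.length

def solution_alt (n : Int) (lost : List Int) (reserve : List Int) : Int :=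
  let ls := PySem.List.sorted (PySem.Set.diff (PySem.Set.ofList lost) (PySem.Set.ofList reserve)) (fun x => x) false
  let rs := PySem.List.sorted (PySem.Set.diff (PySem.Set.ofList reserve) (PySem.Set.ofList lost)) (fun x => x) false
  n - ((ls.length : Int) - twoPtr ls rs)

-- ===== PRECONDITION & SPEC =====
def Spec_solution (n : Int) (lost : List Int) (reserve : List Int) (out : Int) : Prop := out = solution_alt n lost reserve
instance (n : Int) (lost : List Int) (reserve : List Int) (out : Int) : Decidable (Spec_solution n lost reserve out) := by unfold Spec_solution; infer_instance

-- ===== CLAIM (what is proved, stated in full; the proofs are below) =====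
def Claim_equal_solution : Prop := ∀ (n : Int) (lost : List Int) (reserve : List Int), Dom_solution n lost reserve → Spec_solution n lost reserve (solution n lost reserve)

-- ===== LEMMAS AND PROOFS =====

theorem twoPtr_nil_right (L : List Int) : twoPtr L [] = 0 := by
  cases L <;> simp [twoPtr]

theorem twoPtr_nil_left (rs : List Int) : twoPtr [] rs = 0 := by
  simp [twoPtr]

theorem twoPtr_skip (P Q rs : List Int) (h : ∀ e ∈ P, ∀ r' ∈ rs, e < r' - 1) :
    twoPtr (P ++ Q) rs = twoPtr Q rs := by
  induction P with
  | nil => rfl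
  | cons p P ih =>
      cases rs with
      | nil => simp [twoPtr_nil_right]
      | cons r rs' =>
          have hp : p < r - 1 := h p (by simp) r (by simp)
          simp only [List.cons_append, twoPtr, if_pos hp]
          exact ih (fun e he r' hr' => h e (by simp [he]) r' hr')

theorem nodup_of_pairwise_lt {L : List Int} (h : L.Pairwise (· < ·)) : L.Nodup :=
  h.imp (fun hlt => ne_of_lt hlt)

theorem sorted_pairwise_lt_of_nodup (xs : List Int) (h : xs.Nodup) :
    (PySem.List.sorted xs (fun x => x) false).Pairwise (· < ·) := by
  have h1 : (PySem.List.sorted xs (fun x => x) false).Pairwise (· ≤ ·) :=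
    PySem.List.sorted_pairwise xs (fun x => x)
  have h2 : (PySem.List.sorted xs (fun x => x) false).Nodup :=
    (PySem.List.sorted_perm xs (fun x => x) false).symm.nodup h
  exact (h1.and h2).imp (fun hx => lt_of_le_of_ne hx.1 hx.2)

theorem split_lt (L : List Int) (c : Int) (hL : L.Pairwise (· < ·)) :
    ∃ P Q, L = P ++ Q ∧ (∀ e ∈ P, e < c) ∧ (∀ e ∈ Q, c ≤ e) := by
  induction L with
  | nil => exact ⟨[], [], rfl, by simp, by simp⟩
  | cons x L ih =>
      have hx : ∀ e ∈ L, x < e := (List.pairwise_cons.mp hL).1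
      by_cases hxc : x < c
      · obtain ⟨P, Q, hPQ, hP, hQ⟩ := ih (List.pairwise_cons.mp hL).2
        refine ⟨x :: P, Q, by simp [hPQ], ?_, hQ⟩
        intro e he
        rcases List.mem_cons.mp he with h | h
        · exact h ▸ hxc
        · exact hP e h
      · refine ⟨[], x :: L, rfl, by simp, ?_⟩
        intro e he
        rcases List.mem_cons.mp he with h | h
        · omega
        · have := hx e h; omega

theorem length_discard {S : List Int} {x : Int} (hS : S.Nodup) (hx : x ∈ S) :
    ((PySem.Set.discard S x).length : Int) = (S.length : Int) - 1 := by
  have hperm : (PySem.Set.discard S x).Perm (S.erase x) := by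
    refine (List.perm_ext_iff_of_nodup (PySem.Set.nodup_discard S x hS) (hS.erase x)).mpr ?_
    intro y
    rw [PySem.Set.mem_discard, hS.mem_erase_iff]
    tauto
  have hlen := hperm.length_eq
  have := List.length_erase_of_mem hx
  have hpos : 0 < S.length := List.length_pos_of_mem hx
  omega

theorem lendStep_left {S : List Int} {r : Int} (h : r - 1 ∈ S) :
    lendStep S r = PySem.Set.discard S (r - 1) := by
  unfold lendStep
  rw [if_pos ((PySem.Set.contains_iff S (r - 1)).mpr h), PySem.Set.remove?_of_mem h]
  rfl

theorem lendStep_right {S : List Int} {r : Int} (h1 : r - 1 ∉ S) (h2 : r + 1 ∈ S) :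
    lendStep S r = PySem.Set.discard S (r + 1) := by
  unfold lendStep
  rw [if_neg (by simp [h1]),
      if_pos ((PySem.Set.contains_iff S (r + 1)).mpr h2), PySem.Set.remove?_of_mem h2]
  rfl

theorem lendStep_none {S : List Int} {r : Int} (h1 : r - 1 ∉ S) (h2 : r + 1 ∉ S) :
    lendStep S r = S := by
  unfold lendStep
  rw [if_neg (by simp [h1]), if_neg (by simp [h2])]

theorem fold_len : ∀ (rs S L : List Int), S.Nodup → L.Pairwise (· < ·) →
    (∀ x, x ∈ S ↔ x ∈ L) → (∀ x ∈ L, x ∉ rs) → rs.Pairwise (· < ·) →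
    ((rs.foldl lendStep S).length : Int) = (L.length : Int) - twoPtr L rs := by
  intro rs
  induction rs with
  | nil =>
      intro S L hS hL hext _ _
      have hperm : S.Perm L :=
        (List.perm_ext_iff_of_nodup hS (nodup_of_pairwise_lt hL)).mpr hext
      simp [twoPtr_nil_right, hperm.length_eq]
  | cons r rs ih =>
      intro S L hS hL hext hdisj hrs
      obtain ⟨P, Q, hLPQ, hP, hQ⟩ := split_lt L (r - 1) hL
      have hLpq : (P ++ Q).Pairwise (· < ·) := hLPQ ▸ hL
      obtain ⟨hPp, hQp, hcross⟩ := List.pairwise_append.mp hLpq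
      have hrlt : ∀ r' ∈ rs, r < r' := (List.pairwise_cons.mp hrs).1
      have hrs' : rs.Pairwise (· < ·) := (List.pairwise_cons.mp hrs).2
      have hrnot : ∀ x ∈ L, x ≠ r := fun x hx => by
        have := hdisj x hx; simp at this; tauto
      have hdisj' : ∀ x ∈ L, x ∉ rs := fun x hx => by
        have := hdisj x hx; simp at this; tauto
      have hskip : ∀ X, twoPtr (P ++ X) (r :: rs) = twoPtr X (r :: rs) := by
        intro X
        refine twoPtr_skip P X (r :: rs) ?_
        intro e he r' hr'
        have h1 := hP e he
        rcases List.mem_cons.mp hr' with h | h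
        · omega
        · have := hrlt r' h; omega
      have hskip2 : ∀ X, twoPtr (P ++ X) rs = twoPtr X rs := by
        intro X
        refine twoPtr_skip P X rs ?_
        intro e he r' hr'
        have h1 := hP e he
        have := hrlt r' hr'; omega
      rw [List.foldl_cons]
      cases Q with
      | nil =>
          simp only [List.append_nil] at hLPQ
          have hm1 : r - 1 ∉ S := fun hc => by
            have := hP _ (hLPQ ▸ (hext _).mp hc); omega
          have hm2 : r + 1 ∉ S := fun hc => by
            have := hP _ (hLPQ ▸ (hext _).mp hc); omega
          rw [lendStep_none hm1 hm2]
          have hz1 : twoPtr L (r :: rs) = 0 := by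
            rw [hLPQ, show P = P ++ ([] : List Int) by simp, hskip, twoPtr_nil_left]
          have hz2 : twoPtr L rs = 0 := by
            rw [hLPQ, show P = P ++ ([] : List Int) by simp, hskip2, twoPtr_nil_left]
          have := ih S L hS hL hext hdisj' hrs'
          omega
      | cons q Q' =>
          have hqmem : q ∈ L := by rw [hLPQ]; simp
          have hq1 : r - 1 ≤ q := hQ q (by simp)
          have hQ' : ∀ e ∈ Q', q < e := (List.pairwise_cons.mp hQp).1
          have hqne : q ≠ r := hrnot q hqmem
          have hqnotP : q ∉ P := fun hc => by have := hP q hc; omega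
          have hL' : (P ++ Q').Pairwise (· < ·) :=
            List.Pairwise.sublist ((List.sublist_cons_self q Q').append_left P) hLpq
          have hext' : ∀ x, x ∈ PySem.Set.discard S q ↔ x ∈ P ++ Q' := by
            intro x
            have h1 : x ∈ P → x ≠ q := fun hp he => hqnotP (he ▸ hp)
            have h2 : x ∈ Q' → x ≠ q := fun hq he => by
              have := hQ' x hq; rw [he] at this; exact lt_irrefl q this
            rw [PySem.Set.mem_discard, hext, hLPQ]
            simp only [List.mem_append, List.mem_cons]
            constructor
            · rintro ⟨h | h | h, hne⟩
              · exact Or.inl h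
              · exact absurd h hne
              · exact Or.inr h
            · rintro (h | h)
              · exact ⟨Or.inl h, h1 h⟩
              · exact ⟨Or.inr (Or.inr h), h2 h⟩
          have hdisj'' : ∀ x ∈ P ++ Q', x ∉ rs := by
            intro x hx
            refine hdisj' x ?_
            rw [hLPQ]
            rcases List.mem_append.mp hx with h | h
            · exact List.mem_append.mpr (Or.inl h)
            · exact List.mem_append.mpr (Or.inr (List.mem_cons_of_mem q h))
          have hIHmatch :
              ((rs.foldl lendStep (PySem.Set.discard S q)).length : Int)
                = ((P ++ Q').length : Int) - twoPtr (P ++ Q') rs :=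
            ih (PySem.Set.discard S q) (P ++ Q')
              (PySem.Set.nodup_discard S q hS) hL' hext' hdisj'' hrs'
          have hqS : q ∈ S := (hext _).mpr hqmem
          have hlenq : ((PySem.Set.discard S q).length : Int) = (S.length : Int) - 1 := by
            exact length_discard hS hqS
          have hlenS : (S.length : Int) = (L.length : Int) := by
            have hperm : S.Perm L :=
              (List.perm_ext_iff_of_nodup hS (nodup_of_pairwise_lt hL)).mpr hext
            exact congrArg Nat.cast hperm.length_eq
          have hlenL : (L.length : Int) = ((P ++ Q').length : Int) + 1 := by
            rw [hLPQ]; push_cast [List.length_append, List.length_cons]; ring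
          by_cases hc1 : q = r - 1
          · have hmem : r - 1 ∈ S := hc1 ▸ hqS
            rw [lendStep_left hmem, ← hc1]
            have htw1 : twoPtr L (r :: rs) = 1 + twoPtr Q' rs := by
              rw [hLPQ, hskip]
              rw [twoPtr, if_neg (by omega), if_pos (by omega)]
            rw [htw1, hIHmatch, hskip2]
            omega
          · by_cases hc2 : q = r + 1
            · have hm1 : r - 1 ∉ S := by
                intro hc
                have hmemL := (hext _).mp hc
                rw [hLPQ] at hmemL
                rcases List.mem_append.mp hmemL with h | h
                · have := hP _ h; omega
                · rcases List.mem_cons.mp h with h | h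
                  · omega
                  · have := hQ' _ h; omega
              have hmem : r + 1 ∈ S := hc2 ▸ hqS
              rw [lendStep_right hm1 hmem, ← hc2]
              have htw1 : twoPtr L (r :: rs) = 1 + twoPtr Q' rs := by
                rw [hLPQ, hskip]
                rw [twoPtr, if_neg (by omega), if_pos (by omega)]
              rw [htw1, hIHmatch, hskip2]
              omega
            · have hqgt : r + 1 < q := by omega
              have hnot : ∀ v : Int, r - 1 ≤ v → v ≤ r + 1 → v ∉ S := by
                intro v hv1 hv2 hc
                have hmemL := (hext _).mp hc
                rw [hLPQ] at hmemL
                rcases List.mem_append.mp hmemL with h | h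
                · have := hP _ h; omega
                · rcases List.mem_cons.mp h with h | h
                  · omega
                  · have := hQ' _ h; omega
              rw [lendStep_none (hnot (r - 1) (by omega) (by omega)) (hnot (r + 1) (by omega) (by omega))]
              have htw : twoPtr L (r :: rs) = twoPtr L rs := by
                rw [hLPQ, hskip]
                rw [twoPtr, if_neg (by omega), if_neg (by omega)]
                exact (hskip2 (q :: Q')).symm
              rw [htw]
              exact ih S L hS hL hext hdisj' hrs'

-- ===== VERDICT (by name: the statement is the Claim_ definition above) =====
theorem solution_spec : Claim_equal_solution := by
  intro n lost reserve _
  unfold Spec_solution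
  show solution n lost reserve = solution_alt n lost reserve
  simp only [solution, solution_alt]
  have hnl : (PySem.Set.ofList lost).Nodup := PySem.Set.nodup_ofList lost
  have hnr : (PySem.Set.ofList reserve).Nodup := PySem.Set.nodup_ofList reserve
  have hSr_perm : (PySem.Set.diff (PySem.Set.ofList reserve)
        (PySem.Set.inter (PySem.Set.ofList lost) (PySem.Set.ofList reserve))).Perm
      (PySem.Set.diff (PySem.Set.ofList reserve) (PySem.Set.ofList lost)) := by
    refine (List.perm_ext_iff_of_nodup (PySem.Set.nodup_diff _ _ hnr) (PySem.Set.nodup_diff _ _ hnr)).mpr ?_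
    intro x
    rw [PySem.Set.mem_diff, PySem.Set.mem_diff, PySem.Set.mem_inter]
    tauto
  have hrseq : PySem.List.sorted (PySem.Set.diff (PySem.Set.ofList reserve)
        (PySem.Set.inter (PySem.Set.ofList lost) (PySem.Set.ofList reserve))) (fun x => x) false
      = PySem.List.sorted (PySem.Set.diff (PySem.Set.ofList reserve) (PySem.Set.ofList lost)) (fun x => x) false :=
    PySem.List.sorted_eq_sorted_of_perm _ _ _ (fun _ _ h => h) hSr_perm
  have hmain := fold_len
    (PySem.List.sorted (PySem.Set.diff (PySem.Set.ofList reserve) (PySem.Set.ofList lost)) (fun x => x) false)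
    (PySem.Set.diff (PySem.Set.ofList lost)
      (PySem.Set.inter (PySem.Set.ofList lost) (PySem.Set.ofList reserve)))
    (PySem.List.sorted (PySem.Set.diff (PySem.Set.ofList lost) (PySem.Set.ofList reserve)) (fun x => x) false)
    (PySem.Set.nodup_diff _ _ hnl)
    (sorted_pairwise_lt_of_nodup _ (PySem.Set.nodup_diff _ _ hnl))
    (by
      intro x
      rw [PySem.List.mem_sorted, PySem.Set.mem_diff, PySem.Set.mem_diff, PySem.Set.mem_inter]
      tauto)
    (by
      intro x hx hc
      rw [PySem.List.mem_sorted, PySem.Set.mem_diff] at hx hc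
      tauto)
    (sorted_pairwise_lt_of_nodup _ (PySem.Set.nodup_diff _ _ hnr))
  rw [hrseq, hmain]
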